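-- pv_equiv track=rewrite | github.com/samvancook/PIG | api_server.py | weaver_record_has_existing_graphic
-- ===== SOURCE A (Python) =====
-- def positive_int(value) -> int:
--     try:
--         return int(value or 0)
--     except (TypeError, ValueError):
--         return 0
--
-- def weaver_record_has_existing_graphic(record: dict) -> bool:
--     count_keys = (
--         "completionCount",
--         "completedGraphicCount",
--         "completedGraphicsCount",
--         "graphicMadeCount",
--         "qiGraphicMadeCount",
--     )
--     if any(positive_int(record.get(key)) > 0 for key in count_keys):
--         return True
--
--     truthy_keys = (
--         "hasCompletedGraphic",
--         "hasGraphic",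
--         "graphicMade",
--         "hasQiAsset",
--     )
--     if any(str(record.get(key) or "").strip().lower() in {"1", "true", "yes", "y"} for key in truthy_keys):
--         return True
--
--     text_keys = (
--         "assetUrl",
--         "assetPreviewUrl",
--         "driveLink",
--         "fileLink",
--         "completedAt",
--         "existingGraphicFileName",
--         "completedGraphicUrl",
--     )
--     return any(str(record.get(key) or "").strip() for key in text_keys)
-- ===== SOURCE B (Python) =====
-- def positive_int(value) -> int:
--     try:
--         return int(value or 0)
--     except (TypeError, ValueError):
--         return 0
--
-- # One classifier dict: key -> kind (0 = count, 1 = truthy flag, 2 = text)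
-- _KIND = {
--     "completionCount": 0,
--     "completedGraphicCount": 0,
--     "completedGraphicsCount": 0,
--     "graphicMadeCount": 0,
--     "qiGraphicMadeCount": 0,
--     "hasCompletedGraphic": 1,
--     "hasGraphic": 1,
--     "graphicMade": 1,
--     "hasQiAsset": 1,
--     "assetUrl": 2,
--     "assetPreviewUrl": 2,
--     "driveLink": 2,
--     "fileLink": 2,
--     "completedAt": 2,
--     "existingGraphicFileName": 2,
--     "completedGraphicUrl": 2,
-- }
--
-- def weaver_record_has_existing_graphic(record: dict) -> bool:
--     # Single pass over the record's items; each present key is classified once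
--     # via _KIND instead of A's three scans over constant key tuples.
--     for key, value in record.items():
--         kind = _KIND.get(key)
--         if kind is None:
--             continue
--         if kind == 0:
--             hit = positive_int(value) > 0
--         elif kind == 1:
--             hit = str(value or "").strip().lower() in {"1", "true", "yes", "y"}
--         else:
--             hit = bool(str(value or "").strip())
--         if hit:
--             return True
--     return False
-- ===== Notes on version B (the rewrite author's own statement) =====
-- stated objective: alternative
-- what changed: B inverts the traversal: one pass over record.items() with a single key->kind classifier dict and a kind dispatch per item, instead of A's three sequential scans over constant key tuples each doing a dict lookup; Pre_ only excludes association lists with duplicate keys, which cannot arise from a Python dict.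
import Mathlib
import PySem

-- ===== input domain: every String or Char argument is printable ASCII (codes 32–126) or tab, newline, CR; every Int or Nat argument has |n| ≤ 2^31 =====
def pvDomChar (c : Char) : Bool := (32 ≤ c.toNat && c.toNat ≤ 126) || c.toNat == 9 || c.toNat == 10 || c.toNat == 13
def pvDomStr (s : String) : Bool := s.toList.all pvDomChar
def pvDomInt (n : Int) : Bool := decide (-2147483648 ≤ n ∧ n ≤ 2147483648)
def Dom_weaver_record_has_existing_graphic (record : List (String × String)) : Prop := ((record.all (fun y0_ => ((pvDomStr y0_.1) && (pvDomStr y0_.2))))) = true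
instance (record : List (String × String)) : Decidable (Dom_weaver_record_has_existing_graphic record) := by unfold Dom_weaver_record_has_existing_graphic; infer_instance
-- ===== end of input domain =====

-- B makes one pass over the record's items, classifying each present key once with a
-- key→kind table, instead of A's three scans over constant key tuples; alternative
-- decomposition, same cost class.

-- ===== PORT A =====
def pvCountKeys : List String :=
  ["completionCount", "completedGraphicCount", "completedGraphicsCount",
   "graphicMadeCount", "qiGraphicMadeCount"]

def pvTruthyKeys : List String :=
  ["hasCompletedGraphic", "hasGraphic", "graphicMade", "hasQiAsset"]

def pvTextKeys : List String :=
  ["assetUrl", "assetPreviewUrl", "driveLink", "fileLink", "completedAt",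
   "existingGraphicFileName", "completedGraphicUrl"]

-- positive_int(value): int(value or 0), ValueError → 0; value is record.get(key)
def pvPositiveInt (v : Option String) : Int :=
  match v with
  | none => 0
  | some s => if s == "" then 0 else (PySem.Int.ofStr? s).getD 0

def pvCountHit (v : Option String) : Bool := decide (0 < pvPositiveInt v)

-- str(value or "").strip().lower() in {"1","true","yes","y"}
def pvTruthyHit (v : Option String) : Bool :=
  ["1", "true", "yes", "y"].contains (PySem.Str.lower (PySem.Str.strip (v.getD "")))

-- bool(str(value or "").strip())
def pvTextHit (v : Option String) : Bool := PySem.Str.strip (v.getD "") != ""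

def weaver_record_has_existing_graphic (record : List (String × String)) : Bool :=
  if pvCountKeys.any (fun k => pvCountHit ((PySem.Dict.mk record).get? k)) then true
  else if pvTruthyKeys.any (fun k => pvTruthyHit ((PySem.Dict.mk record).get? k)) then true
  else pvTextKeys.any (fun k => pvTextHit ((PySem.Dict.mk record).get? k))

-- ===== PORT B =====
-- _KIND.get(key) on the literal classifier dict: first-match lookup written out
def pvKind (k : String) : Option Int :=
  if k == "completionCount" then some 0
  else if k == "completedGraphicCount" then some 0
  else if k == "completedGraphicsCount" then some 0
  else if k == "graphicMadeCount" then some 0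
  else if k == "qiGraphicMadeCount" then some 0
  else if k == "hasCompletedGraphic" then some 1
  else if k == "hasGraphic" then some 1
  else if k == "graphicMade" then some 1
  else if k == "hasQiAsset" then some 1
  else if k == "assetUrl" then some 2
  else if k == "assetPreviewUrl" then some 2
  else if k == "driveLink" then some 2
  else if k == "fileLink" then some 2
  else if k == "completedAt" then some 2
  else if k == "existingGraphicFileName" then some 2
  else if k == "completedGraphicUrl" then some 2
  else none

-- the per-kind hit test on one value (value is always present here)
def pvKindHit (kind : Int) (v : String) : Bool :=
  if kind == 0 then
    match (if v == "" then some 0 else PySem.Int.ofStr? v) with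
    | some n => decide (0 < n)
    | none => false
  else if kind == 1 then
    let s := PySem.Str.lower (PySem.Str.strip v)
    s == "1" || s == "true" || s == "yes" || s == "y"
  else
    !(PySem.Str.strip v == "")

def weaver_record_has_existing_graphic_alt : List (String × String) → Bool
  | [] => false
  | (k, v) :: rest =>
    match pvKind k with
    | none => weaver_record_has_existing_graphic_alt rest
    | some kind =>
      if pvKindHit kind v then true
      else weaver_record_has_existing_graphic_alt rest

-- ===== PRECONDITION & SPEC =====
-- Pre_ excludes association lists with duplicate keys: they do not represent a Python
-- dict (dict keys are unique), and there A's first-match get() vs B's scan of all items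
-- are both defensible.
def Pre_weaver_record_has_existing_graphic (record : List (String × String)) : Prop :=
  (record.map Prod.fst).Nodup

instance (record : List (String × String)) : Decidable (Pre_weaver_record_has_existing_graphic record) := by
  unfold Pre_weaver_record_has_existing_graphic; infer_instance

def pvWitness_weaver_record_has_existing_graphic : (List (String × String)) :=
  [("assetUrl", "x"), ("completionCount", "0")]

def Spec_weaver_record_has_existing_graphic (record : List (String × String)) (out : Bool) : Prop := out = weaver_record_has_existing_graphic_alt record
instance (record : List (String × String)) (out : Bool) : Decidable (Spec_weaver_record_has_existing_graphic record out) := by unfold Spec_weaver_record_has_existing_graphic; infer_instance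

-- ===== CLAIM (what is proved, stated in full; the proofs are below) =====
def Claim_equal_weaver_record_has_existing_graphic : Prop := ∀ (record : List (String × String)), Dom_weaver_record_has_existing_graphic record → Pre_weaver_record_has_existing_graphic record → Spec_weaver_record_has_existing_graphic record (weaver_record_has_existing_graphic record)

-- ===== LEMMAS AND PROOFS =====

theorem pvCountHit_none : pvCountHit none = false := by decide
theorem pvTruthyHit_none : pvTruthyHit none = false := by decide
theorem pvTextHit_none : pvTextHit none = false := by decide

-- disjointness of the three literal key lists
theorem pv_dis_ct (k : String) (h : pvCountKeys.contains k = true) :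
    pvTruthyKeys.contains k = false := by
  simp [pvCountKeys] at h
  rcases h with rfl | rfl | rfl | rfl | rfl <;> decide

theorem pv_dis_cx (k : String) (h : pvCountKeys.contains k = true) :
    pvTextKeys.contains k = false := by
  simp [pvCountKeys] at h
  rcases h with rfl | rfl | rfl | rfl | rfl <;> decide

theorem pv_dis_tx (k : String) (h : pvTruthyKeys.contains k = true) :
    pvTextKeys.contains k = false := by
  simp [pvTruthyKeys] at h
  rcases h with rfl | rfl | rfl | rfl <;> decide

-- pvKind versus the three key lists of A
theorem pvKind_of_count (k : String) (h : pvCountKeys.contains k = true) :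
    pvKind k = some 0 := by
  simp [pvCountKeys] at h
  rcases h with rfl | rfl | rfl | rfl | rfl <;> decide

theorem pvKind_of_truthy (k : String) (h : pvTruthyKeys.contains k = true) :
    pvKind k = some 1 := by
  simp [pvTruthyKeys] at h
  rcases h with rfl | rfl | rfl | rfl <;> decide

theorem pvKind_of_text (k : String) (h : pvTextKeys.contains k = true) :
    pvKind k = some 2 := by
  simp [pvTextKeys] at h
  rcases h with rfl | rfl | rfl | rfl | rfl | rfl | rfl <;> decide

theorem pvKind_of_none (k : String) (h1 : pvCountKeys.contains k = false)
    (h2 : pvTruthyKeys.contains k = false) (h3 : pvTextKeys.contains k = false) :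
    pvKind k = none := by
  simp [pvCountKeys] at h1
  simp [pvTruthyKeys] at h2
  simp [pvTextKeys] at h3
  simp [pvKind, beq_iff_eq, h1.1, h1.2.1, h1.2.2.1, h1.2.2.2.1, h1.2.2.2.2,
    h2.1, h2.2.1, h2.2.2.1, h2.2.2.2,
    h3.1, h3.2.1, h3.2.2.1, h3.2.2.2.1, h3.2.2.2.2.1, h3.2.2.2.2.2.1, h3.2.2.2.2.2.2]

-- the per-kind tests agree with A's option-level predicates on a present value
theorem pvKindHit_zero (v : String) : pvKindHit 0 v = pvCountHit (some v) := by
  show (match (if v == "" then some 0 else PySem.Int.ofStr? v) with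
        | some n => decide (0 < n)
        | none => false)
      = decide (0 < (if v == "" then 0 else (PySem.Int.ofStr? v).getD 0))
  by_cases hv : (v == "") = true
  · rw [if_pos hv, if_pos hv]
  · rw [if_neg hv, if_neg hv]
    cases h : PySem.Int.ofStr? v <;> simp

theorem pvKindHit_one (v : String) : pvKindHit 1 v = pvTruthyHit (some v) := by
  show (let s := PySem.Str.lower (PySem.Str.strip v)
        (s == "1" || s == "true" || s == "yes" || s == "y"))
      = ["1", "true", "yes", "y"].contains (PySem.Str.lower (PySem.Str.strip v))
  simp only [List.contains_cons, List.contains_nil, Bool.or_false]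
  simp [Bool.or_assoc]

theorem pvKindHit_two (v : String) : pvKindHit 2 v = pvTextHit (some v) := rfl

-- lookup of an absent key
theorem pv_get?_mk_none (r : List (String × String)) (k : String)
    (h : k ∉ r.map Prod.fst) : (PySem.Dict.mk r).get? k = none := by
  induction r with
  | nil => rfl
  | cons p rest ih =>
    rw [show PySem.Dict.mk (p :: rest) = PySem.Dict.mk ((p.1, p.2) :: rest) from rfl]
    rw [PySem.Dict.get?_mk_cons]
    simp only [List.map_cons, List.mem_cons, not_or] at h
    rw [if_neg (by simpa [beq_iff_eq] using Ne.symm h.1), ih h.2]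

-- one cons step of the record, seen through an 'any' over a constant key list
theorem pv_any_step (ks : List String) (q : Option String → Bool) (hq : q none = false)
    (k : String) (v : String) (rest : List (String × String))
    (hk : k ∉ rest.map Prod.fst) :
    ks.any (fun key => q ((PySem.Dict.mk ((k, v) :: rest)).get? key))
      = (ks.contains k && q (some v) || ks.any (fun key => q ((PySem.Dict.mk rest).get? key))) := by
  induction ks with
  | nil => rfl
  | cons key ks ih =>
    rw [List.any_cons, List.any_cons, List.contains_cons, ih, PySem.Dict.get?_mk_cons]
    by_cases hke : k = key
    · subst hke
      rw [if_pos (by simp), pv_get?_mk_none rest k hk, hq]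
      cases hv : q (some v) <;> simp
    · have hb : (k == key) = false := by simpa using hke
      rw [if_neg (by simp [hb]), hb]
      cases hv : q (some v) <;> simp [Bool.or_left_comm]

theorem alt_eq_parts (r : List (String × String))
    (hnd : (r.map Prod.fst).Nodup) :
    weaver_record_has_existing_graphic_alt r
      = (pvCountKeys.any (fun k => pvCountHit ((PySem.Dict.mk r).get? k))
         || pvTruthyKeys.any (fun k => pvTruthyHit ((PySem.Dict.mk r).get? k))
         || pvTextKeys.any (fun k => pvTextHit ((PySem.Dict.mk r).get? k))) := by
  induction r with
  | nil => rfl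
  | cons p rest ih =>
    obtain ⟨k, v⟩ := p
    simp only [List.map_cons, List.nodup_cons] at hnd
    obtain ⟨hk, hnd'⟩ := hnd
    rw [pv_any_step pvCountKeys pvCountHit pvCountHit_none k v rest hk,
        pv_any_step pvTruthyKeys pvTruthyHit pvTruthyHit_none k v rest hk,
        pv_any_step pvTextKeys pvTextHit pvTextHit_none k v rest hk]
    show weaver_record_has_existing_graphic_alt ((k, v) :: rest) = _
    unfold weaver_record_has_existing_graphic_alt
    by_cases hc : pvCountKeys.contains k = true
    · have h2 : pvTruthyKeys.contains k = false := pv_dis_ct k hc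
      have h3 : pvTextKeys.contains k = false := pv_dis_cx k hc
      rw [pvKind_of_count k hc]
      simp only [hc, h2, h3, pvKindHit_zero]
      cases hv : pvCountHit (some v) <;> simp [ih hnd']
    · have hc' : pvCountKeys.contains k = false := by
        revert hc; cases pvCountKeys.contains k <;> simp
      by_cases ht : pvTruthyKeys.contains k = true
      · have h3 : pvTextKeys.contains k = false := pv_dis_tx k ht
        rw [pvKind_of_truthy k ht]
        simp only [hc', ht, h3, pvKindHit_one]
        cases hv : pvTruthyHit (some v) <;> simp [ih hnd']
      · have ht' : pvTruthyKeys.contains k = false := by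
          revert ht; cases pvTruthyKeys.contains k <;> simp
        by_cases hx : pvTextKeys.contains k = true
        · rw [pvKind_of_text k hx]
          simp only [hc', ht', hx, pvKindHit_two]
          by_cases hv : pvTextHit (some v) = true
          · rw [if_pos hv]; simp [hv]
          · have hv' : pvTextHit (some v) = false := by
              revert hv; cases pvTextHit (some v) <;> simp
            rw [if_neg hv]; simp [hv', ih hnd']
        · have hx' : pvTextKeys.contains k = false := by
            revert hx; cases pvTextKeys.contains k <;> simp
          rw [pvKind_of_none k hc' ht' hx']
          have mc : k ∉ pvCountKeys := by simpa using hc'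
          have mt : k ∉ pvTruthyKeys := by simpa using ht'
          have mx : k ∉ pvTextKeys := by simpa using hx'
          simp [mc, mt, mx, ih hnd']

-- ===== VERDICT (by name: the statement is the Claim_ definition above) =====
theorem weaver_record_has_existing_graphic_spec : Claim_equal_weaver_record_has_existing_graphic := by
  intro record _ hpre
  unfold Spec_weaver_record_has_existing_graphic
  rw [alt_eq_parts record hpre]
  unfold weaver_record_has_existing_graphic
  cases h1 : pvCountKeys.any (fun k => pvCountHit ((PySem.Dict.mk record).get? k)) <;>
    cases h2 : pvTruthyKeys.any (fun k => pvTruthyHit ((PySem.Dict.mk record).get? k)) <;>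
      simp
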